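-- pv_equiv track=rewrite | github.com/matheusar322/EP2 | dev1.py | verificacao
-- ===== SOURCE A (Python) =====
-- def indica_posicao(sorteada, especulada):
--     lista_posicao = []
--     if len(sorteada) != len(especulada):
--         return lista_posicao
--     else:
--         i = 0
--         while i<len(sorteada):
--             if especulada[i] in sorteada:
--                 if sorteada[i] == especulada[i]:
--                     lista_posicao.append(0)
--                 else:
--                     lista_posicao.append(1)
--             else:
--                 lista_posicao.append(2)
--             i += 1
--     return lista_posicao
--
-- def verificacao(correta, tentativa):
--     resultado = indica_posicao(correta, tentativa)
--     ajuda = []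
--     for a, b in enumerate(resultado):
--         if b == 0:
--             ajuda.append('\033[34m' + tentativa[a])
--         elif b == 1:
--             ajuda.append('\033[33m' + tentativa[a])
--         else:
--             ajuda.append('\033[37m' + tentativa[a])
--     return ' '.join(ajuda)
-- ===== SOURCE B (Python) =====
-- def verificacao(correta, tentativa):
--     if len(correta) != len(tentativa):
--         return ''
--     cores = []
--     for i, ch in enumerate(tentativa):
--         if ch not in correta:
--             cores.append('\033[37m' + ch)
--         elif correta[i] == ch:
--             cores.append('\033[34m' + ch)
--         else:
--             cores.append('\033[33m' + ch)
--     return ' '.join(cores)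
-- ===== Notes on version B (the rewrite author's own statement) =====
-- stated objective: simpler
-- what changed: Single pass: the intermediate integer colour-code list and its enumerating second loop are gone; each letter is coloured directly in one loop over enumerate(tentativa).
import Mathlib
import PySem

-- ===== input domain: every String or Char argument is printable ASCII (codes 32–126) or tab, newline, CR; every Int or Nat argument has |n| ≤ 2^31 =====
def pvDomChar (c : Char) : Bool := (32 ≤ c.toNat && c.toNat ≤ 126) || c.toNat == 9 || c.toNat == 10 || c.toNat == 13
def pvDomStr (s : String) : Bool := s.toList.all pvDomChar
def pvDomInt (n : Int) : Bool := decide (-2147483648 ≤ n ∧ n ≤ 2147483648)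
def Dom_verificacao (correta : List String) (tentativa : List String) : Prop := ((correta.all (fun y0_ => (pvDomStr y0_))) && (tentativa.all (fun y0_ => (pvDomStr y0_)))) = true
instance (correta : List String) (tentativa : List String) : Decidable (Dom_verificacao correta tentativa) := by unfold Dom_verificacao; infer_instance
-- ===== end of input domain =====

-- B fuses A's two passes into one loop, dropping the intermediate colour-code list; objective: simpler.

-- ===== PORT A =====
-- the while loop of indica_posicao, i counting up to len(sorteada)
def ipGo (sorteada especulada : List String) (i : Nat) : List Int :=
  if _h : i < sorteada.length then
    (if especulada.getD i "" ∈ sorteada then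
       (if sorteada.getD i "" = especulada.getD i "" then (0 : Int) else 1)
     else 2) :: ipGo sorteada especulada (i + 1)
  else []
termination_by sorteada.length - i

def indicaPosicao (sorteada especulada : List String) : List Int :=
  if sorteada.length ≠ especulada.length then [] else ipGo sorteada especulada 0

def verificacao (correta : List String) (tentativa : List String) : String :=
  let resultado := indicaPosicao correta tentativa
  let ajuda := (PySem.List.enumerate resultado).map (fun ab =>
    if ab.2 = 0 then "\x1b[34m" ++ PySem.List.pyGetD tentativa ab.1 ""
    else if ab.2 = 1 then "\x1b[33m" ++ PySem.List.pyGetD tentativa ab.1 ""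
    else "\x1b[37m" ++ PySem.List.pyGetD tentativa ab.1 "")
  PySem.Str.join " " ajuda

-- ===== PORT B =====
def verificacao_alt (correta : List String) (tentativa : List String) : String :=
  if correta.length ≠ tentativa.length then "" else
  PySem.Str.join " " ((PySem.List.enumerate tentativa).map (fun p =>
    if p.2 ∉ correta then "\x1b[37m" ++ p.2
    else if PySem.List.pyGetD correta p.1 "" = p.2 then "\x1b[34m" ++ p.2
    else "\x1b[33m" ++ p.2))

-- ===== PRECONDITION & SPEC =====
def Spec_verificacao (correta : List String) (tentativa : List String) (out : String) : Prop := out = verificacao_alt correta tentativa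
instance (correta : List String) (tentativa : List String) (out : String) : Decidable (Spec_verificacao correta tentativa out) := by unfold Spec_verificacao; infer_instance

-- ===== CLAIM (what is proved, stated in full; the proofs are below) =====
def Claim_equal_verificacao : Prop := ∀ (correta : List String) (tentativa : List String), Dom_verificacao correta tentativa → Spec_verificacao correta tentativa (verificacao correta tentativa)

-- ===== LEMMAS AND PROOFS =====

theorem length_ipGo (s e : List String) (i : Nat) : (ipGo s e i).length = s.length - i := by
  unfold ipGo
  split
  · rw [List.length_cons, length_ipGo]; omega
  · simp only [List.length_nil]; omega
termination_by s.length - i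

theorem getElem_ipGo (s e : List String) (i j : Nat) (h : j < (ipGo s e i).length) :
    (ipGo s e i)[j] =
      (if e.getD (i + j) "" ∈ s then
         (if s.getD (i + j) "" = e.getD (i + j) "" then (0 : Int) else 1)
       else 2) := by
  rw [length_ipGo] at h
  unfold ipGo
  split
  · cases j with
    | zero => simp
    | succ k =>
      simp only [List.getElem_cons_succ]
      rw [getElem_ipGo s e (i + 1) k (by rw [length_ipGo]; omega)]
      ring_nf
  · omega
termination_by s.length - i

theorem verificacao_eq (correta tentativa : List String) :
    verificacao correta tentativa = verificacao_alt correta tentativa := by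
  unfold verificacao verificacao_alt indicaPosicao
  by_cases hlen : correta.length ≠ tentativa.length
  · simp [hlen, PySem.Str.join, PySem.Chars.join, List.intercalate]
  · rw [not_not] at hlen
    simp only [hlen, ne_eq, not_true_eq_false, if_false]
    congr 1
    apply List.ext_getElem
    · simp [length_ipGo, hlen]
    · intro j h1 h2
      simp only [List.getElem_map, PySem.List.getElem_enumerate]
      have hj : j < tentativa.length := by
        simpa [length_ipGo, hlen] using h1
      rw [getElem_ipGo correta tentativa 0 j (by rw [length_ipGo]; omega)]
      simp only [zero_add]
      have hcj : j < correta.length := by omega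
      have ht : tentativa[j]?.getD "" = tentativa[j] := by
        simp [List.getElem?_eq_getElem hj]
      have hc : correta[j]?.getD "" = correta[j] := by
        simp [List.getElem?_eq_getElem hcj]
      by_cases hmem : tentativa[j] ∈ correta
      · by_cases heq : correta[j] = tentativa[j] <;>
          simp [PySem.List.pyGetD_natCast, List.getD, hmem, heq, hc, ht]
      · simp [PySem.List.pyGetD_natCast, List.getD, hmem, ht]

-- ===== VERDICT (by name: the statement is the Claim_ definition above) =====
theorem verificacao_spec : Claim_equal_verificacao := by
  intro correta tentativa _
  unfold Spec_verificacao
  exact verificacao_eq correta tentativa
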